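-- pv_equiv track=rewrite | github.com/ekpasowecabronneta-hue/duckclaw | packages/shared/src/duckclaw/utils/telegram_markdown_v2.py | _markdown_fence_spans
-- ===== SOURCE A (Python) =====
-- def _markdown_fence_spans(text: str) -> list[tuple[int, int]]:
--     """Intervalos [start, end) que cubren cada bloque ```…``` (end exclusivo del cierre)."""
--     spans: list[tuple[int, int]] = []
--     pos = 0
--     n = len(text)
--     while pos < n:
--         a = text.find("```", pos)
--         if a == -1:
--             break
--         b = text.find("```", a + 3)
--         if b == -1:
--             spans.append((a, n))
--             break
--         spans.append((a, b + 3))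
--         pos = b + 3
--     return spans
-- ===== SOURCE B (Python) =====
-- def _markdown_fence_spans(text: str) -> list[tuple[int, int]]:
--     """Intervalos [start, end): collect all non-overlapping ``` markers, then pair them."""
--     markers: list[int] = []
--     pos = 0
--     while True:
--         a = text.find("```", pos)
--         if a == -1:
--             break
--         markers.append(a)
--         pos = a + 3
--     spans: list[tuple[int, int]] = []
--     n = len(text)
--     for i in range(0, len(markers), 2):
--         start = markers[i]
--         if i + 1 < len(markers):
--             spans.append((start, markers[i + 1] + 3))
--         else:
--             spans.append((start, n))
--     return spans
-- ===== Notes on version B (the rewrite author's own statement) =====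
-- stated objective: alternative
-- what changed: Single interleaved find-and-pair loop replaced by two phases: first collect all non-overlapping ``` marker positions, then pair them up two at a time (last unpaired marker closes at len(text)).
import Mathlib
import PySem

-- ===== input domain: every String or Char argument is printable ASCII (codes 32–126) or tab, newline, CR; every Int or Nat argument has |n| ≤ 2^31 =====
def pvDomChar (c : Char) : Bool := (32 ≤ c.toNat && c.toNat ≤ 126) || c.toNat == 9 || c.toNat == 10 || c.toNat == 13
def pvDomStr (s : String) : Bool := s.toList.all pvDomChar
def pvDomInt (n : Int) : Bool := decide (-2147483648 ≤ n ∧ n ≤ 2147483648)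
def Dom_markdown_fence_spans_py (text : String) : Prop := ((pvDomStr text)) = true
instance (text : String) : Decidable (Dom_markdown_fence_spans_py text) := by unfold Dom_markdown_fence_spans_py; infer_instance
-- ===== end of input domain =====

-- B replaces A's interleaved find-and-pair while-loop by two phases (collect all non-overlapping
-- ``` marker positions, then pair them two at a time); objective: alternative decomposition.

-- ===== PORT A =====
-- A's while-loop, one fuel unit per iteration (fuel only makes the recursion total; n+1 always suffices).
def pvALoop (s : List Char) (n : Int) (fuel : Nat) (pos : Int) : List (Int × Int) :=
  match fuel with
  | 0 => []
  | fuel + 1 =>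
    if pos < n then
      let a := PySem.Chars.findFrom s ['`', '`', '`'] pos none
      if a = -1 then []
      else
        let b := PySem.Chars.findFrom s ['`', '`', '`'] (a + 3) none
        if b = -1 then [(a, n)]
        else (a, b + 3) :: pvALoop s n fuel (b + 3)
    else []

def markdown_fence_spans_py (text : String) : List (Int × Int) :=
  pvALoop text.toList (text.toList.length : Int) (text.toList.length + 1) 0

-- ===== PORT B =====
-- phase 1: every non-overlapping ``` marker position (fuel as above)
def pvMarkers (s : List Char) (fuel : Nat) (pos : Int) : List Int :=
  match fuel with
  | 0 => []
  | fuel + 1 =>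
    let a := PySem.Chars.findFrom s ['`', '`', '`'] pos none
    if a = -1 then [] else a :: pvMarkers s fuel (a + 3)

-- phase 2: pair the markers two at a time; a last unpaired opener closes at n
def pvPair (n : Int) : List Int → List (Int × Int)
  | [] => []
  | [a] => [(a, n)]
  | a :: b :: rest => (a, b + 3) :: pvPair n rest

def markdown_fence_spans_py_alt (text : String) : List (Int × Int) :=
  pvPair (text.toList.length : Int) (pvMarkers text.toList (text.toList.length + 1) 0)

-- ===== PRECONDITION & SPEC =====
def Spec_markdown_fence_spans_py (text : String) (out : List (Int × Int)) : Prop := out = markdown_fence_spans_py_alt text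
instance (text : String) (out : List (Int × Int)) : Decidable (Spec_markdown_fence_spans_py text out) := by unfold Spec_markdown_fence_spans_py; infer_instance

-- ===== CLAIM (what is proved, stated in full; the proofs are below) =====
def Claim_equal_markdown_fence_spans_py : Prop := ∀ (text : String), Dom_markdown_fence_spans_py text → Spec_markdown_fence_spans_py text (markdown_fence_spans_py text)

-- ===== LEMMAS AND PROOFS =====

-- one-step unfolding equations (to rewrite a specific fuel instance only)
theorem pvALoop_step (s : List Char) (n : Int) (g : Nat) (q : Int) :
    pvALoop s n (g + 1) q =
      (if q < n then
        let a := PySem.Chars.findFrom s ['`', '`', '`'] q none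
        if a = -1 then []
        else
          let b := PySem.Chars.findFrom s ['`', '`', '`'] (a + 3) none
          if b = -1 then [(a, n)]
          else (a, b + 3) :: pvALoop s n g (b + 3)
      else []) := rfl

theorem pvMarkers_step (s : List Char) (g : Nat) (q : Int) :
    pvMarkers s (g + 1) q =
      (let a := PySem.Chars.findFrom s ['`', '`', '`'] q none
       if a = -1 then [] else a :: pvMarkers s g (a + 3)) := rfl

-- A hit of findFrom lies at or after pos and leaves room for the 3-char pattern.
theorem pv_find_bounds (s : List Char) (pos : Int) (h0 : 0 ≤ pos) (hn : pos ≤ (s.length : Int))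
    (h : PySem.Chars.findFrom s ['`', '`', '`'] pos none ≠ -1) :
    pos ≤ PySem.Chars.findFrom s ['`', '`', '`'] pos none ∧
    PySem.Chars.findFrom s ['`', '`', '`'] pos none + 3 ≤ (s.length : Int) := by
  obtain ⟨k, rfl⟩ : ∃ k : Nat, pos = (k : Int) := ⟨pos.toNat, (Int.toNat_of_nonneg h0).symm⟩
  have hkl : k ≤ s.length := by exact_mod_cast hn
  obtain ⟨h1, h2, -⟩ := PySem.Chars.findFrom_natCast_spec s ['`', '`', '`'] k hkl h
  refine ⟨h1, ?_⟩
  have hlen : 3 ≤ s.length - (PySem.Chars.findFrom s ['`', '`', '`'] (k : Int) none).toNat := by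
    have := h2.length_le
    rw [List.length_drop] at this
    simpa using this
  omega

-- pvMarkers is fuel-independent once fuel covers the remaining text (each step advances pos by ≥ 3).
theorem pv_markers_stable (s : List Char) :
    ∀ (fuel : Nat) (pos : Int), 0 ≤ pos → pos ≤ (s.length : Int) →
      (s.length : Int) ≤ pos + 3 * fuel →
      pvMarkers s (fuel + 1) pos = pvMarkers s fuel pos := by
  intro fuel
  induction fuel with
  | zero =>
    intro pos h0 hn hf
    rw [pvMarkers_step s 0 pos]
    by_cases h : PySem.Chars.findFrom s ['`', '`', '`'] pos none = -1
    · simp [h, pvMarkers]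
    · have := pv_find_bounds s pos h0 hn h
      push_cast at hf
      omega
  | succ f ih =>
    intro pos h0 hn hf
    rw [pvMarkers_step s (f + 1) pos, pvMarkers_step s f pos]
    by_cases h : PySem.Chars.findFrom s ['`', '`', '`'] pos none = -1
    · simp [h]
    · have hb := pv_find_bounds s pos h0 hn h
      simp only [h, if_false]
      rw [ih (PySem.Chars.findFrom s ['`', '`', '`'] pos none + 3) (by omega) (by omega)
        (by push_cast at hf ⊢; omega)]

-- main invariant: with enough fuel, A's loop equals pairing of the marker list.
theorem pv_main (s : List Char) :
    ∀ (fuel : Nat) (pos : Int), 0 ≤ pos → pos ≤ (s.length : Int) →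
      (s.length : Int) ≤ pos + 3 * fuel →
      pvALoop s (s.length : Int) fuel pos = pvPair (s.length : Int) (pvMarkers s fuel pos) := by
  intro fuel
  induction fuel with
  | zero => intro pos h0 hn hf; simp [pvALoop, pvMarkers, pvPair]
  | succ f ih =>
    intro pos h0 hn hf
    rw [pvALoop_step, pvMarkers_step]
    by_cases hpos : pos < (s.length : Int)
    · simp only [hpos, if_true]
      by_cases ha : PySem.Chars.findFrom s ['`', '`', '`'] pos none = -1
      · simp [ha, pvPair]
      · simp only [ha, if_false]
        set a := PySem.Chars.findFrom s ['`', '`', '`'] pos none with hadef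
        have haB := pv_find_bounds s pos h0 hn ha
        by_cases hb : PySem.Chars.findFrom s ['`', '`', '`'] (a + 3) none = -1
        · -- last marker unclosed: the tail of the marker list is empty
          have htail : pvMarkers s f (a + 3) = [] := by
            cases f with
            | zero => rfl
            | succ f' => rw [pvMarkers_step]; simp [hb]
          simp [hb, htail, pvPair]
        · simp only [hb, if_false]
          set b := PySem.Chars.findFrom s ['`', '`', '`'] (a + 3) none with hbdef
          have hbB := pv_find_bounds s (a + 3) (by omega) (by omega) hb
          -- f ≥ 1 since the text still holds two markers beyond pos
          cases f with
          | zero => push_cast at hf; omega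
          | succ f' =>
            rw [pvMarkers_step s f' (a + 3)]
            simp only [← hbdef, hb, if_false]
            rw [pvPair]
            rw [ih (b + 3) (by omega) (by omega) (by push_cast at hf ⊢; omega)]
            rw [pv_markers_stable s f' (b + 3) (by omega) (by omega)
              (by push_cast at hf ⊢; omega)]
    · -- pos = length: no marker can start here, both sides are empty
      have ha : PySem.Chars.findFrom s ['`', '`', '`'] pos none = -1 := by
        by_contra h
        have := pv_find_bounds s pos h0 hn h
        omega
      simp [hpos, ha, pvPair]

-- ===== VERDICT (by name: the statement is the Claim_ definition above) =====
theorem markdown_fence_spans_py_spec : Claim_equal_markdown_fence_spans_py := by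
  intro text _
  unfold Spec_markdown_fence_spans_py markdown_fence_spans_py markdown_fence_spans_py_alt
  exact pv_main text.toList (text.toList.length + 1) 0 le_rfl (Int.natCast_nonneg _)
    (by push_cast; omega)
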